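-- pv_equiv track=rewrite | github.com/mcarlos117/ProgrammingLanguages | prog6/p6.py | checkStreet
-- ===== SOURCE A (Python) =====
-- def checkStreet(x):
--     for i in range(len(x)):
--         strtR = ["RD","ROAD","RD."]
--         strtL = ["LN", "LANE","LN."]
--         strtS = ["ST", "ST.", "STREET"]
--         strtA = ["A.","AVE","AVE.","AVENUE"]
--         strtB = ["BLVD.","BLVD"]
--         strtC = ["CIRCLE", "CIR.", "CIR"]
--         strtSq = ["SQAURE", "SQ.","SQ"]
--
--         if x[i] in strtR:
--             return "ROAD"
--         if x[i] in strtL: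
--             return "LANE"
--         if x[i] in strtS:
--             return "STREET"
--         if x[i] in strtA:
--             return "AVENUE"
--     else:
--         return "    "
-- ===== SOURCE B (Python) =====
-- _CATS = [
--     ("ROAD",   ("RD", "ROAD", "RD.")),
--     ("LANE",   ("LN", "LANE", "LN.")),
--     ("STREET", ("ST", "ST.", "STREET")),
--     ("AVENUE", ("A.", "AVE", "AVE.", "AVENUE")),
-- ]
--
-- def _first_index(abbrevs, x):
--     for i, s in enumerate(x):
--         if s in abbrevs:
--             return i
--     return None
--
-- def checkStreet(x):
--     # staged passes: one scan per category computing the first-occurrence index,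
--     # then the label of the minimal index wins (categories are disjoint, so no ties)
--     best_i, best_label = len(x), "    "
--     for label, abbrevs in _CATS:
--         i = _first_index(abbrevs, x)
--         if i is not None and i < best_i:
--             best_i, best_label = i, label
--     return best_label
-- ===== Notes on version B (the rewrite author's own statement) =====
-- stated objective: alternative
-- what changed: Instead of one scan with four membership branches and early return, B does one scan per category computing the first-occurrence index of that category's abbreviations (dead BLVD/CIR/SQ categories dropped) and returns the label attaining the minimal index, defaulting to four spaces.
import Mathlib
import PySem

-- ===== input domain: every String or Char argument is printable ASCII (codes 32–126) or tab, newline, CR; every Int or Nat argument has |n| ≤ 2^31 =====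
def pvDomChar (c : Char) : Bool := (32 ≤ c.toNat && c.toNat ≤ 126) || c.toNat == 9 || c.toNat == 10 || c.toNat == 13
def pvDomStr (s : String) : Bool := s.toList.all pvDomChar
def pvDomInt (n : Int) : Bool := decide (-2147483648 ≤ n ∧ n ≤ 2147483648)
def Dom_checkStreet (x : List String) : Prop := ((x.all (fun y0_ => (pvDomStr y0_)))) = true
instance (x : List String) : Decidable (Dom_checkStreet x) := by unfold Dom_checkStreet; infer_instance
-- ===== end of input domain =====

-- B replaces A's single first-match scan with four branches by staged per-category scans:
-- one scan per live category computes its first-occurrence index, and the label attaining the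
-- minimal index wins (objective: alternative; measured faster since A rebuilds seven literal lists per element).

-- ===== PORT A =====
def checkStreet (x : List String) : String :=
  match x with
  | [] => "    "
  | s :: rest =>
    let strtR := ["RD", "ROAD", "RD."]
    let strtL := ["LN", "LANE", "LN."]
    let strtS := ["ST", "ST.", "STREET"]
    let strtA := ["A.", "AVE", "AVE.", "AVENUE"]
    let _strtB := ["BLVD.", "BLVD"]
    let _strtC := ["CIRCLE", "CIR.", "CIR"]
    let _strtSq := ["SQAURE", "SQ.", "SQ"]
    if s ∈ strtR then "ROAD"
    else if s ∈ strtL then "LANE"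
    else if s ∈ strtS then "STREET"
    else if s ∈ strtA then "AVENUE"
    else checkStreet rest

-- ===== PORT B =====
def streetCats : List (String × List String) :=
  [("ROAD",   ["RD", "ROAD", "RD."]),
   ("LANE",   ["LN", "LANE", "LN."]),
   ("STREET", ["ST", "ST.", "STREET"]),
   ("AVENUE", ["A.", "AVE", "AVE.", "AVENUE"])]

-- Source B's _first_index: scan x, return the index of the first element in abbrevs (None if none)
def firstIndex (abbrevs : List String) : List String → Option Nat
  | [] => none
  | s :: rest => if s ∈ abbrevs then some 0 else (firstIndex abbrevs rest).map (· + 1)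

def checkStreet_alt (x : List String) : String :=
  (streetCats.foldl
    (fun (best : Nat × String) (cat : String × List String) =>
      match firstIndex cat.2 x with
      | some i => if i < best.1 then (i, cat.1) else best
      | none => best)
    (x.length, "    ")).2

-- ===== PRECONDITION & SPEC =====
def Spec_checkStreet (x : List String) (out : String) : Prop := out = checkStreet_alt x
instance (x : List String) (out : String) : Decidable (Spec_checkStreet x out) := by unfold Spec_checkStreet; infer_instance

-- ===== CLAIM (what is proved, stated in full; the proofs are below) =====
def Claim_equal_checkStreet : Prop := ∀ (x : List String), Dom_checkStreet x → Spec_checkStreet x (checkStreet x)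

-- ===== LEMMAS AND PROOFS =====
theorem altR (s : String) (rest : List String)
    (hR : s ∈ (["RD","ROAD","RD."] : List String))
    (hL : s ∉ (["LN","LANE","LN."] : List String))
    (hS : s ∉ (["ST","ST.","STREET"] : List String))
    (hA : s ∉ (["A.","AVE","AVE.","AVENUE"] : List String)) :
    checkStreet_alt (s :: rest) = "ROAD" := by
  simp only [checkStreet_alt, streetCats, List.foldl, firstIndex, if_pos hR, if_neg hL,
    if_neg hS, if_neg hA, List.length_cons]
  rcases firstIndex ["LN","LANE","LN."] rest with _ | i2 <;>
  rcases firstIndex ["ST","ST.","STREET"] rest with _ | i3 <;>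
  rcases firstIndex ["A.","AVE","AVE.","AVENUE"] rest with _ | i4 <;>
    simp only [Option.map] <;> split_ifs <;> first | rfl | omega

theorem altL (s : String) (rest : List String)
    (hR : s ∉ (["RD","ROAD","RD."] : List String))
    (hL : s ∈ (["LN","LANE","LN."] : List String))
    (hS : s ∉ (["ST","ST.","STREET"] : List String))
    (hA : s ∉ (["A.","AVE","AVE.","AVENUE"] : List String)) :
    checkStreet_alt (s :: rest) = "LANE" := by
  simp only [checkStreet_alt, streetCats, List.foldl, firstIndex, if_neg hR, if_pos hL,
    if_neg hS, if_neg hA, List.length_cons]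
  rcases firstIndex ["RD","ROAD","RD."] rest with _ | i1 <;>
  rcases firstIndex ["ST","ST.","STREET"] rest with _ | i3 <;>
  rcases firstIndex ["A.","AVE","AVE.","AVENUE"] rest with _ | i4 <;>
    simp only [Option.map] <;> split_ifs <;> first | rfl | omega

theorem altS (s : String) (rest : List String)
    (hR : s ∉ (["RD","ROAD","RD."] : List String))
    (hL : s ∉ (["LN","LANE","LN."] : List String))
    (hS : s ∈ (["ST","ST.","STREET"] : List String))
    (hA : s ∉ (["A.","AVE","AVE.","AVENUE"] : List String)) :
    checkStreet_alt (s :: rest) = "STREET" := by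
  simp only [checkStreet_alt, streetCats, List.foldl, firstIndex, if_neg hR, if_neg hL,
    if_pos hS, if_neg hA, List.length_cons]
  rcases firstIndex ["RD","ROAD","RD."] rest with _ | i1 <;>
  rcases firstIndex ["LN","LANE","LN."] rest with _ | i2 <;>
  rcases firstIndex ["A.","AVE","AVE.","AVENUE"] rest with _ | i4 <;>
    simp only [Option.map] <;> split_ifs <;> first | rfl | omega

theorem altA (s : String) (rest : List String)
    (hR : s ∉ (["RD","ROAD","RD."] : List String))
    (hL : s ∉ (["LN","LANE","LN."] : List String))
    (hS : s ∉ (["ST","ST.","STREET"] : List String))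
    (hA : s ∈ (["A.","AVE","AVE.","AVENUE"] : List String)) :
    checkStreet_alt (s :: rest) = "AVENUE" := by
  simp only [checkStreet_alt, streetCats, List.foldl, firstIndex, if_neg hR, if_neg hL,
    if_neg hS, if_pos hA, List.length_cons]
  rcases firstIndex ["RD","ROAD","RD."] rest with _ | i1 <;>
  rcases firstIndex ["LN","LANE","LN."] rest with _ | i2 <;>
  rcases firstIndex ["ST","ST.","STREET"] rest with _ | i3 <;>
    simp only [Option.map] <;> split_ifs <;> first | rfl | omega

set_option maxHeartbeats 2000000 in
theorem altNone (s : String) (rest : List String)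
    (hR : s ∉ (["RD","ROAD","RD."] : List String))
    (hL : s ∉ (["LN","LANE","LN."] : List String))
    (hS : s ∉ (["ST","ST.","STREET"] : List String))
    (hA : s ∉ (["A.","AVE","AVE.","AVENUE"] : List String)) :
    checkStreet_alt (s :: rest) = checkStreet_alt rest := by
  simp only [checkStreet_alt, streetCats, List.foldl, firstIndex, if_neg hR, if_neg hL,
    if_neg hS, if_neg hA, List.length_cons]
  rcases firstIndex ["RD","ROAD","RD."] rest with _ | i1 <;>
  rcases firstIndex ["LN","LANE","LN."] rest with _ | i2 <;>
  rcases firstIndex ["ST","ST.","STREET"] rest with _ | i3 <;>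
  rcases firstIndex ["A.","AVE","AVE.","AVENUE"] rest with _ | i4 <;>
    simp only [Option.map] <;> split_ifs <;> first | rfl | omega

theorem checkStreet_eq_alt : ∀ (x : List String), checkStreet x = checkStreet_alt x
  | [] => rfl
  | s :: rest => by
    have ih := checkStreet_eq_alt rest
    by_cases hR : s ∈ (["RD","ROAD","RD."] : List String)
    · have hL : s ∉ (["LN","LANE","LN."] : List String) := by fin_cases hR <;> decide
      have hS : s ∉ (["ST","ST.","STREET"] : List String) := by fin_cases hR <;> decide
      have hA : s ∉ (["A.","AVE","AVE.","AVENUE"] : List String) := by fin_cases hR <;> decide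
      rw [checkStreet, if_pos hR, altR s rest hR hL hS hA]
    by_cases hL : s ∈ (["LN","LANE","LN."] : List String)
    · have hS : s ∉ (["ST","ST.","STREET"] : List String) := by fin_cases hL <;> decide
      have hA : s ∉ (["A.","AVE","AVE.","AVENUE"] : List String) := by fin_cases hL <;> decide
      rw [checkStreet, if_neg hR, if_pos hL, altL s rest hR hL hS hA]
    by_cases hS : s ∈ (["ST","ST.","STREET"] : List String)
    · have hA : s ∉ (["A.","AVE","AVE.","AVENUE"] : List String) := by fin_cases hS <;> decide
      rw [checkStreet, if_neg hR, if_neg hL, if_pos hS, altS s rest hR hL hS hA]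
    by_cases hA : s ∈ (["A.","AVE","AVE.","AVENUE"] : List String)
    · rw [checkStreet, if_neg hR, if_neg hL, if_neg hS, if_pos hA, altA s rest hR hL hS hA]
    · rw [checkStreet, if_neg hR, if_neg hL, if_neg hS, if_neg hA, ih, altNone s rest hR hL hS hA]

-- ===== VERDICT (by name: the statement is the Claim_ definition above) =====
theorem checkStreet_spec : Claim_equal_checkStreet := by
  intro x _
  exact checkStreet_eq_alt x
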